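-- pv_equiv track=rewrite | github.com/sangqkim/DS2 | Python I/HW1/최희영/7장 과제.py | f14
-- ===== SOURCE A (Python) =====
-- def f14(rows,cols):
--     m= list([0]*(cols+2) for _ in range(rows+2))
--
--     for i in range(1,rows+1):
--         for j in range(1,cols+1):
--             m[i][j]=1
--     res=[]
--
--     for i in range(1, rows + 1):
--         row=[]
--         for j in range(1, cols + 1):
--             row.append((m[i-1][j]+m[i+1][j]+m[i][j-1]+m[i][j+1]))
--         res.append(row)
--     return res
-- ===== SOURCE B (Python) =====
-- def f14(rows, cols):
--     # closed form: each cell counts its in-bounds neighbors directly, no bordered grid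
--     return [[(i > 1) + (i < rows) + (j > 1) + (j < cols) for j in range(1, cols + 1)]
--             for i in range(1, rows + 1)]
-- ===== Notes on version B (the rewrite author's own statement) =====
-- stated objective: simpler
-- what changed: B drops the materialized (rows+2)x(cols+2) bordered 0/1 grid and its four neighbor lookups per cell, computing each cell's neighbor count by the positional closed form (i>1)+(i<rows)+(j>1)+(j<cols).
import Mathlib
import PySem

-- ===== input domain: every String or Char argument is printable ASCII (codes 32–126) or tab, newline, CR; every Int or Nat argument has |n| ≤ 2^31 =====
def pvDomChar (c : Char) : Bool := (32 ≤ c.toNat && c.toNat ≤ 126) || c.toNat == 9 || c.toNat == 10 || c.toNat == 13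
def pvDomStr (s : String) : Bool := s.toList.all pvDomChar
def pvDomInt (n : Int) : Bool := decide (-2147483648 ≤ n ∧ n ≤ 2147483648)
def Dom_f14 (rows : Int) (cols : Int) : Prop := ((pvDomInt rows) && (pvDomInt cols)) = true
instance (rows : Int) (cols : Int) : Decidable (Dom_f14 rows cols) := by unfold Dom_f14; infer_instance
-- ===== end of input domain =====

-- B replaces A's materialized bordered 0/1 grid + neighbor lookups by a positional closed form; simpler, same return value.

-- ===== PORT A =====
-- All list indices in A's loops are nonnegative and in range, so pySetD/pyGetD are exact here.
def f14 (rows : Int) (cols : Int) : List (List Int) :=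
  let m0 : List (List Int) :=
    (PySem.List.pyRange 0 (rows+2) 1).map (fun _ => List.replicate (cols+2).toNat (0:Int))
  let m : List (List Int) :=
    (PySem.List.pyRange 1 (rows+1) 1).foldl (fun m i =>
      (PySem.List.pyRange 1 (cols+1) 1).foldl (fun m j =>
        PySem.List.pySetD m i (PySem.List.pySetD (PySem.List.pyGetD m i []) j 1)) m) m0
  (PySem.List.pyRange 1 (rows+1) 1).foldl (fun res i =>
    res ++ [(PySem.List.pyRange 1 (cols+1) 1).foldl (fun row j =>
      row ++ [PySem.List.pyGetD (PySem.List.pyGetD m (i-1) []) j 0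
            + PySem.List.pyGetD (PySem.List.pyGetD m (i+1) []) j 0
            + PySem.List.pyGetD (PySem.List.pyGetD m i []) (j-1) 0
            + PySem.List.pyGetD (PySem.List.pyGetD m i []) (j+1) 0]) []]) []

-- ===== PORT B =====
def f14_alt (rows : Int) (cols : Int) : List (List Int) :=
  (PySem.List.pyRange 1 (rows+1) 1).map (fun i =>
    (PySem.List.pyRange 1 (cols+1) 1).map (fun j =>
      (if 1 < i then (1:Int) else 0) + (if i < rows then 1 else 0)
      + (if 1 < j then 1 else 0) + (if j < cols then 1 else 0)))

-- ===== PRECONDITION & SPEC =====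
def Spec_f14 (rows : Int) (cols : Int) (out : List (List Int)) : Prop := out = f14_alt rows cols
instance (rows : Int) (cols : Int) (out : List (List Int)) : Decidable (Spec_f14 rows cols out) := by unfold Spec_f14; infer_instance

-- ===== CLAIM (what is proved, stated in full; the proofs are below) =====
def Claim_equal_f14 : Prop := ∀ (rows : Int) (cols : Int), Dom_f14 rows cols → Spec_f14 rows cols (f14 rows cols)

-- ===== LEMMAS AND PROOFS =====

-- Setting 1 at every index of l preserves the row length.
theorem pv_len_rowfill (l : List Int) (r : List Int) :
    (l.foldl (fun r j => PySem.List.pySetD r j 1) r).length = r.length := by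
  induction l generalizing r with
  | nil => rfl
  | cons a t ih => simp only [List.foldl_cons]; rw [ih]; exact PySem.List.length_pySetD ..

-- Filling a row: after setting 1 at every index in l, reading q gives 1 if q ∈ l, else the old value.
theorem pv_rowfill_get (l : List Int) (r : List Int) (q : Int)
    (hl : ∀ a ∈ l, 0 ≤ a ∧ a < (r.length : Int)) (h0 : 0 ≤ q) (hq : q < (r.length : Int)) :
    PySem.List.pyGetD (l.foldl (fun r j => PySem.List.pySetD r j 1) r) q 0
      = if q ∈ l then 1 else PySem.List.pyGetD r q 0 := by
  induction l generalizing r with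
  | nil => simp
  | cons a t ih =>
    have ha := hl a (List.mem_cons_self ..)
    simp only [List.foldl_cons]
    rw [ih _ (by intro b hb; rw [PySem.List.length_pySetD]; exact hl b (List.mem_cons_of_mem _ hb))
        (by rw [PySem.List.length_pySetD]; exact hq)]
    by_cases hmem : q ∈ t
    · simp [hmem]
    · simp only [hmem, if_false, List.mem_cons, or_false]
      rw [PySem.List.pySetD_of_nonneg _ _ ha.1,
          PySem.List.pyGetD_eq_getElem _ _ h0 (by simpa using hq),
          PySem.List.pyGetD_eq_getElem _ _ h0 hq,
          List.getElem_set]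
      by_cases hqa : q = a
      · simp [hqa]
      · have hne : a.toNat ≠ q.toNat := by omega
        simp [hne, hqa]

-- One pass of A's inner loop equals replacing row i wholesale by its filled version.
theorem pv_inner_eq (l : List Int) (m : List (List Int)) (i : Int)
    (h0 : 0 ≤ i) (hi : i < (m.length : Int)) :
    l.foldl (fun m j => PySem.List.pySetD m i (PySem.List.pySetD (PySem.List.pyGetD m i []) j 1)) m
      = PySem.List.pySetD m i (l.foldl (fun r j => PySem.List.pySetD r j 1) (PySem.List.pyGetD m i [])) := by
  induction l generalizing m with
  | nil =>
    simp only [List.foldl_nil]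
    rw [PySem.List.pySetD_of_nonneg _ _ h0, PySem.List.pyGetD_eq_getElem _ _ h0 hi]
    exact (List.set_getElem_self ..).symm
  | cons a t ih =>
    simp only [List.foldl_cons]
    rw [ih _ (by rw [PySem.List.length_pySetD]; exact hi)]
    rw [PySem.List.pySetD_of_nonneg _ _ h0, PySem.List.pySetD_of_nonneg _ _ h0,
        PySem.List.pySetD_of_nonneg _ _ h0,
        PySem.List.pyGetD_eq_getElem _ _ h0 hi,
        PySem.List.pyGetD_eq_getElem _ _ h0 (by simpa using hi)]
    simp [List.set_set]

-- The filled grid: reading (p,q) in bounds gives 1 inside the filled rectangle, else the old entry.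
theorem pv_outer_get (lr lc : List Int) (m : List (List Int)) (p q : Int) (L : Nat)
    (hl : ∀ a ∈ lr, 0 ≤ a ∧ a < (m.length : Int)) (hp0 : 0 ≤ p) (hp : p < (m.length : Int))
    (hrow : ∀ row ∈ m, row.length = L) (hq0 : 0 ≤ q) (hq : q < (L : Int))
    (hc : ∀ b ∈ lc, 0 ≤ b ∧ b < (L : Int)) :
    PySem.List.pyGetD (PySem.List.pyGetD
      (lr.foldl (fun m i =>
        lc.foldl (fun m j => PySem.List.pySetD m i (PySem.List.pySetD (PySem.List.pyGetD m i []) j 1)) m) m) p []) q 0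
      = if p ∈ lr ∧ q ∈ lc then 1 else PySem.List.pyGetD (PySem.List.pyGetD m p []) q 0 := by
  induction lr generalizing m with
  | nil => simp
  | cons a t ih =>
    have ha := hl a (List.mem_cons_self ..)
    simp only [List.foldl_cons]
    rw [pv_inner_eq lc m a ha.1 ha.2]
    set fl := lc.foldl (fun r j => PySem.List.pySetD r j 1) (PySem.List.pyGetD m a []) with hfl
    set m' := PySem.List.pySetD m a fl with hm'
    have hrowa : (PySem.List.pyGetD m a []).length = L := by
      rw [PySem.List.pyGetD_eq_getElem _ _ ha.1 ha.2]
      exact hrow _ (List.getElem_mem _)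
    have hfll : fl.length = L := by rw [hfl, pv_len_rowfill]; exact hrowa
    have hlenm' : (m'.length : Int) = (m.length : Int) := by
      rw [hm', PySem.List.length_pySetD]
    have hrowm' : ∀ row ∈ m', row.length = L := by
      intro row hr
      rw [hm', PySem.List.pySetD_of_nonneg _ _ ha.1] at hr
      rcases List.mem_or_eq_of_mem_set hr with h | h
      · exact hrow _ h
      · rw [h]; exact hfll
    rw [ih m' (by intro b hb; rw [hlenm']; exact hl b (List.mem_cons_of_mem _ hb))
        (by rw [hlenm']; exact hp) hrowm']
    have key : PySem.List.pyGetD (PySem.List.pyGetD m' p []) q 0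
        = if p = a ∧ q ∈ lc then 1 else PySem.List.pyGetD (PySem.List.pyGetD m p []) q 0 := by
      by_cases hpa : p = a
      · subst hpa
        rw [hm', PySem.List.pySetD_of_nonneg _ _ ha.1,
            PySem.List.pyGetD_eq_getElem _ _ ha.1 (by simpa using ha.2),
            List.getElem_set_self]
        rw [hfl, pv_rowfill_get lc _ q (by intro b hb; rw [hrowa]; exact hc b hb) hq0
            (by rw [hrowa]; exact hq),
            PySem.List.pyGetD_eq_getElem _ _ ha.1 ha.2]
        simp
      · have hne : a.toNat ≠ p.toNat := by omega
        rw [hm', PySem.List.pySetD_of_nonneg _ _ ha.1,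
            PySem.List.pyGetD_eq_getElem _ _ hp0 (by simpa using hp),
            List.getElem_set_ne hne,
            PySem.List.pyGetD_eq_getElem _ _ hp0 hp]
        simp [hpa]
    rw [key]
    by_cases hqc : q ∈ lc <;> by_cases hpt : p ∈ t <;> by_cases hpa : p = a <;>
      simp [hqc, hpt, hpa]

-- Entry of the fresh bordered zero grid is 0 at every in-bounds position.
theorem pv_m0_get (rows cols p q : Int) (hp0 : 0 ≤ p) (hp : p < rows + 2)
    (hq0 : 0 ≤ q) (hq : q < cols + 2) :
    PySem.List.pyGetD (PySem.List.pyGetD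
      ((PySem.List.pyRange 0 (rows+2) 1).map (fun _ => List.replicate (cols+2).toNat (0:Int))) p []) q 0 = 0 := by
  rw [PySem.List.pyGetD_map_pyRange_of_nonneg _ _ _ _ hp0 hp,
      PySem.List.pyGetD_eq_getElem _ _ hq0 (by simp; omega)]
  simp

-- ===== VERDICT (by name: the statement is the Claim_ definition above) =====
theorem f14_spec : Claim_equal_f14 := by
  intro rows cols _
  show f14 rows cols = f14_alt rows cols
  unfold f14 f14_alt
  rw [PySem.List.foldl_append_singleton_eq_map]
  simp only [List.nil_append]
  apply List.map_congr_left
  intro i hi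
  rw [PySem.List.foldl_append_singleton_eq_map]
  simp only [List.nil_append]
  apply List.map_congr_left
  intro j hj
  rw [PySem.List.mem_pyRange_one] at hi hj
  have hrows1 : (1:Int) ≤ rows := by omega
  have hcols1 : (1:Int) ≤ cols := by omega
  have hmlen : ((((PySem.List.pyRange 0 (rows+2) 1).map
      (fun _ => List.replicate (cols+2).toNat (0:Int))).length : Int)) = rows + 2 := by
    simp [PySem.List.length_pyRange_one]; omega
  have hLint : (((cols+2).toNat : Int)) = cols + 2 := by omega
  have hlr : ∀ a ∈ PySem.List.pyRange 1 (rows+1) 1, 0 ≤ a ∧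
      a < ((((PySem.List.pyRange 0 (rows+2) 1).map
        (fun _ => List.replicate (cols+2).toNat (0:Int))).length : Int)) := by
    intro a ha; rw [PySem.List.mem_pyRange_one] at ha; rw [hmlen]; omega
  have hrow : ∀ row ∈ (PySem.List.pyRange 0 (rows+2) 1).map
      (fun _ => List.replicate (cols+2).toNat (0:Int)), row.length = (cols+2).toNat := by
    intro row hr; rcases List.mem_map.mp hr with ⟨_, _, h⟩; rw [← h]; simp
  have hc : ∀ b ∈ PySem.List.pyRange 1 (cols+1) 1, 0 ≤ b ∧ b < (((cols+2).toNat : Int)) := by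
    intro b hb; rw [PySem.List.mem_pyRange_one] at hb; rw [hLint]; omega
  rw [pv_outer_get _ _ _ _ _ _ hlr (by omega) (by rw [hmlen]; omega) hrow (by omega)
        (by rw [hLint]; omega) hc,
      pv_outer_get _ _ _ _ _ _ hlr (by omega) (by rw [hmlen]; omega) hrow (by omega)
        (by rw [hLint]; omega) hc,
      pv_outer_get _ _ _ _ _ _ hlr (by omega) (by rw [hmlen]; omega) hrow (by omega)
        (by rw [hLint]; omega) hc,
      pv_outer_get _ _ _ _ _ _ hlr (by omega) (by rw [hmlen]; omega) hrow (by omega)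
        (by rw [hLint]; omega) hc,
      pv_m0_get rows cols _ _ (by omega) (by omega) (by omega) (by omega),
      pv_m0_get rows cols _ _ (by omega) (by omega) (by omega) (by omega),
      pv_m0_get rows cols _ _ (by omega) (by omega) (by omega) (by omega),
      pv_m0_get rows cols _ _ (by omega) (by omega) (by omega) (by omega)]
  simp only [PySem.List.mem_pyRange_one]
  split_ifs <;> omega
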